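-- pv_equiv track=rewrite | github.com/lachiemyatt/hourglass | hourglass/ui.py | _format_deadline_digits
-- ===== SOURCE A (Python) =====
-- def _format_deadline_digits(digits: str) -> str:
--     slots = ["_"] * 12
--     for idx, ch in enumerate(digits[:12]):
--         slots[idx] = ch
--     return (
--         f"{slots[0]}{slots[1]}{slots[2]}{slots[3]}-"
--         f"{slots[4]}{slots[5]}-"
--         f"{slots[6]}{slots[7]} "
--         f"{slots[8]}{slots[9]}:"
--         f"{slots[10]}{slots[11]}"
--     )
-- ===== SOURCE B (Python) =====
-- def _format_deadline_digits(digits: str) -> str: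
--     it = iter(digits)
--     out = []
--     for ch in "dddd-dd-dd dd:dd":
--         out.append(next(it, "_") if ch == "d" else ch)
--     return "".join(out)
-- ===== Notes on version B (the rewrite author's own statement) =====
-- stated objective: idiomatic
-- what changed: B walks a 16-char mask 'dddd-dd-dd dd:dd' consuming digits lazily via next(it,'_'), instead of padding a 12-slot list by index assignment and splicing it into a hard-coded f-string.
import Mathlib
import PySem

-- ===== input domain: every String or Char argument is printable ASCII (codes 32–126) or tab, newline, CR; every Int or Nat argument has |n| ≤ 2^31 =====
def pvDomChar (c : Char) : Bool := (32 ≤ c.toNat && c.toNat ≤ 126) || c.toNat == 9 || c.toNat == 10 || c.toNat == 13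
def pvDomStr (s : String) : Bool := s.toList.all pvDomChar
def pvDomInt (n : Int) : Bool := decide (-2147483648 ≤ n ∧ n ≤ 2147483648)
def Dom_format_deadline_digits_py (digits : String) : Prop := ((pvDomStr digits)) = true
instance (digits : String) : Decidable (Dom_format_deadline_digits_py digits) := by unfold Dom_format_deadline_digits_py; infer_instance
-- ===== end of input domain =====

-- B re-implements A by walking the mask "dddd-dd-dd dd:dd" and consuming digits lazily
-- (objective: idiomatic; same cost; return value only — neither version mutates its argument).

-- ===== PORT A =====
-- slots = ["_"]*12; for idx, ch in enumerate(digits[:12]): slots[idx] = ch; then the f-string.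
-- list-level body of A (helper; A = String.ofList of this on digits.toList)
def pvSlotsOut (l : List Char) : List Char :=
  let slots := (PySem.List.enumerate (l.take 12)).foldl
    (fun (s : List Char) (p : Int × Char) => s.set p.1.toNat p.2) (List.replicate 12 '_')
  [slots.getD 0 '_', slots.getD 1 '_', slots.getD 2 '_', slots.getD 3 '_', '-',
             slots.getD 4 '_', slots.getD 5 '_', '-',
             slots.getD 6 '_', slots.getD 7 '_', ' ',
             slots.getD 8 '_', slots.getD 9 '_', ':',
             slots.getD 10 '_', slots.getD 11 '_']

def format_deadline_digits_py (digits : String) : String :=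
  String.ofList (pvSlotsOut digits.toList)

-- ===== PORT B =====
-- the mask "dddd-dd-dd dd:dd" from Source B, as a char list
def pvMask : List Char :=
  ['d','d','d','d','-','d','d','-','d','d',' ','d','d',':','d','d']

-- the loop of Source B: for ch in mask, append next(it,'_') if ch == 'd' else ch
def pvFill : List Char → List Char → List Char
  | [], _ => []
  | m :: ms, ds =>
    if m = 'd' then
      match ds with
      | [] => '_' :: pvFill ms []
      | d :: ds' => d :: pvFill ms ds'
    else m :: pvFill ms ds

def format_deadline_digits_py_alt (digits : String) : String :=
  String.ofList (pvFill pvMask digits.toList)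

-- ===== PRECONDITION & SPEC =====
def Spec_format_deadline_digits_py (digits : String) (out : String) : Prop := out = format_deadline_digits_py_alt digits
instance (digits : String) (out : String) : Decidable (Spec_format_deadline_digits_py digits out) := by unfold Spec_format_deadline_digits_py; infer_instance

-- ===== CLAIM (what is proved, stated in full; the proofs are below) =====
def Claim_equal_format_deadline_digits_py : Prop := ∀ (digits : String), Dom_format_deadline_digits_py digits → Spec_format_deadline_digits_py digits (format_deadline_digits_py digits)

-- ===== LEMMAS AND PROOFS =====

-- Both ports look at at most the first 12 characters; case on that prefix.
theorem pv_core (l : List Char) : pvSlotsOut l = pvFill pvMask l := by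
  match l with
  | [] => simp [pvSlotsOut, pvFill, pvMask, List.getD]
  | [_] => simp [pvSlotsOut, pvFill, pvMask, List.getD]
  | [_,_] => simp [pvSlotsOut, pvFill, pvMask, List.getD]
  | [_,_,_] => simp [pvSlotsOut, pvFill, pvMask, List.getD]
  | [_,_,_,_] => simp [pvSlotsOut, pvFill, pvMask, List.getD]
  | [_,_,_,_,_] => simp [pvSlotsOut, pvFill, pvMask, List.getD]
  | [_,_,_,_,_,_] => simp [pvSlotsOut, pvFill, pvMask, List.getD]
  | [_,_,_,_,_,_,_] => simp [pvSlotsOut, pvFill, pvMask, List.getD]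
  | [_,_,_,_,_,_,_,_] => simp [pvSlotsOut, pvFill, pvMask, List.getD]
  | [_,_,_,_,_,_,_,_,_] => simp [pvSlotsOut, pvFill, pvMask, List.getD]
  | [_,_,_,_,_,_,_,_,_,_] => simp [pvSlotsOut, pvFill, pvMask, List.getD]
  | [_,_,_,_,_,_,_,_,_,_,_] => simp [pvSlotsOut, pvFill, pvMask, List.getD]
  | _::_::_::_::_::_::_::_::_::_::_::_::_ => simp [pvSlotsOut, pvFill, pvMask, List.getD]

-- ===== VERDICT (by name: the statement is the Claim_ definition above) =====
theorem format_deadline_digits_py_spec : Claim_equal_format_deadline_digits_py := by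
  intro digits _
  unfold Spec_format_deadline_digits_py
  exact congrArg String.ofList (pv_core digits.toList)
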